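-- pv_equiv track=rewrite | github.com/kdave007/statistics_py | controllers/compressor_samples_driver.py | retrieveGPIO12
-- ===== SOURCE A (Python) =====
-- def retrieveGPIO12(states,columnNames):
--      gpiosStatus = []
--      num_bits = 16
--      # bits = [(row[1] >> bit) & 1 for bit in range(num_bits - 1, -1, -1)]
--      for bit in range(num_bits - 1, -1, -1):
--           if (states >> bit) & 1:
--                gpiosStatus.append(0)#invert state
--           else:
--                gpiosStatus.append(1)
--      return gpiosStatus[3]
-- ===== SOURCE B (Python) =====
-- def retrieveGPIO12(states, columnNames):
--     # closed form: list index 3 of inverted bits 15..0 is the inverted bit 12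
--     return 1 - ((states >> 12) & 1)
-- ===== Notes on version B (the rewrite author's own statement) =====
-- stated objective: simpler
-- what changed: Replaces the 16-iteration loop that builds an inverted-bit list and indexes it with the closed form 1 - ((states >> 12) & 1).
import Mathlib
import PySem

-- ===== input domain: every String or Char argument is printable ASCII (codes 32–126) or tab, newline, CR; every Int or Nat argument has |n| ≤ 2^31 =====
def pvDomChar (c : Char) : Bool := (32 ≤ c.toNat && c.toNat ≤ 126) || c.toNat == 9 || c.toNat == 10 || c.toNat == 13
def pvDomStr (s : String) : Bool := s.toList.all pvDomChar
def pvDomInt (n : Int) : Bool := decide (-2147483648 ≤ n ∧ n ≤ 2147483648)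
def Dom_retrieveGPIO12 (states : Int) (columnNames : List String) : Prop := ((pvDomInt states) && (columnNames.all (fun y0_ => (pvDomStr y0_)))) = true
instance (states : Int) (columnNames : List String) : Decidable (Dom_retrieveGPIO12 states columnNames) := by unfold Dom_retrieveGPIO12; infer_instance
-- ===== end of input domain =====

-- B replaces A's 16-step loop + list indexing by the closed form 1 - ((states >> 12) & 1) (simpler).

-- ===== PORT A =====
-- loop 'for bit in range(15, -1, -1): append 0/1'; bit ≥ 0 throughout, so '.toNat' on the
-- range value is exact for Python's 'states >> bit'.
def retrieveGPIO12 (states : Int) (columnNames : List String) : Int :=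
  let gpiosStatus :=
    (PySem.List.pyRange 15 (-1) (-1)).foldl
      (fun acc bit =>
        if PySem.Int.band (states >>> bit.toNat) 1 ≠ 0 then acc ++ [0] else acc ++ [1])
      ([] : List Int)
  -- gpiosStatus[3]: always in range (the list has 16 elements), so getD 0 is exact
  (PySem.List.pyGet? gpiosStatus 3).getD 0

-- ===== PORT B =====
def retrieveGPIO12_alt (states : Int) (columnNames : List String) : Int :=
  1 - PySem.Int.band (states >>> 12) 1

-- ===== PRECONDITION & SPEC =====
def Spec_retrieveGPIO12 (states : Int) (columnNames : List String) (out : Int) : Prop := out = retrieveGPIO12_alt states columnNames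
instance (states : Int) (columnNames : List String) (out : Int) : Decidable (Spec_retrieveGPIO12 states columnNames out) := by unfold Spec_retrieveGPIO12; infer_instance

-- ===== CLAIM (what is proved, stated in full; the proofs are below) =====
def Claim_equal_retrieveGPIO12 : Prop := ∀ (states : Int) (columnNames : List String), Dom_retrieveGPIO12 states columnNames → Spec_retrieveGPIO12 states columnNames (retrieveGPIO12 states columnNames)

-- ===== LEMMAS AND PROOFS =====
theorem band_one_cases (a : Int) : PySem.Int.band a 1 = 0 ∨ PySem.Int.band a 1 = 1 := by
  rw [PySem.Int.band_one]
  have h1 := PySem.Int.mod_nonneg a (b := 2) (by omega)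
  have h2 := PySem.Int.mod_lt a (b := 2) (by omega)
  omega

-- ===== VERDICT (by name: the statement is the Claim_ definition above) =====
theorem foldA_eq_map (states : Int) (l : List Int) (acc : List Int) :
    l.foldl
      (fun acc bit =>
        if PySem.Int.band (states >>> bit.toNat) 1 ≠ 0 then acc ++ [(0:Int)] else acc ++ [1])
      acc
    = acc ++ l.map (fun bit => if PySem.Int.band (states >>> bit.toNat) 1 ≠ 0 then (0:Int) else 1) := by
  induction l generalizing acc with
  | nil => simp
  | cons x xs ih => simp only [List.foldl, List.map]; split <;> rw [ih] <;> simp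

theorem retrieveGPIO12_spec : Claim_equal_retrieveGPIO12 := by
  intro states columnNames _
  unfold Spec_retrieveGPIO12 retrieveGPIO12 retrieveGPIO12_alt
  rw [show PySem.List.pyRange 15 (-1) (-1) = [15,14,13,12,11,10,9,8,7,6,5,4,3,2,1,0] from by decide]
  rw [foldA_eq_map]
  rcases band_one_cases (states >>> 12) with h | h <;>
    simp [PySem.List.pyGet?, PySem.List.pyIdx?, h]
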